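-- pv_equiv track=rewrite | github.com/souliane/teatree | src/teatree/utils/django_db.py | _parse_dslr_snapshots
-- ===== SOURCE A (Python) =====
-- def _parse_dslr_snapshots(stdout: str) -> dict[str, list[str]]:
--     """Parse ``dslr list`` output, group snapshot names by tenant (suffix after date)."""
--     by_tenant: dict[str, list[str]] = {}
--     for line in stdout.splitlines():
--         token = line.strip().split()[0] if line.strip() else ""
--         if not token:
--             continue
--         # Snapshot names: <date>_<tenant>  e.g. "20260401_development-acme"
--         if "_" in token:
--             tenant = token.split("_", maxsplit=1)[1]
--             by_tenant.setdefault(tenant, []).append(token)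
--     for names in by_tenant.values():
--         names.sort(reverse=True)
--     return by_tenant
-- ===== SOURCE B (Python) =====
-- def _parse_dslr_snapshots(stdout: str) -> dict[str, list[str]]:
--     """Parse ``dslr list`` output, group snapshot names by tenant (suffix after date)."""
--     tokens: list[str] = []
--     for line in stdout.splitlines():
--         token = line.strip().split()[0] if line.strip() else ""
--         if token and "_" in token:
--             tokens.append(token)
--     by_tenant: dict[str, list[str]] = {}
--     for token in tokens:
--         by_tenant.setdefault(token.split("_", maxsplit=1)[1], [])
--     for token in sorted(tokens, reverse=True):
--         by_tenant[token.split("_", maxsplit=1)[1]].append(token)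
--     return by_tenant
-- ===== Notes on version B (the rewrite author's own statement) =====
-- stated objective: alternative
-- what changed: Instead of appending tokens into a per-tenant dict during the scan and then sorting every tenant's list separately, B collects all tokens into one flat list, sorts it once globally descending, and groups the already-ordered tokens into the dict in a second pass (keys pre-seeded in first-appearance order), so no per-group sort is needed.
import Mathlib
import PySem

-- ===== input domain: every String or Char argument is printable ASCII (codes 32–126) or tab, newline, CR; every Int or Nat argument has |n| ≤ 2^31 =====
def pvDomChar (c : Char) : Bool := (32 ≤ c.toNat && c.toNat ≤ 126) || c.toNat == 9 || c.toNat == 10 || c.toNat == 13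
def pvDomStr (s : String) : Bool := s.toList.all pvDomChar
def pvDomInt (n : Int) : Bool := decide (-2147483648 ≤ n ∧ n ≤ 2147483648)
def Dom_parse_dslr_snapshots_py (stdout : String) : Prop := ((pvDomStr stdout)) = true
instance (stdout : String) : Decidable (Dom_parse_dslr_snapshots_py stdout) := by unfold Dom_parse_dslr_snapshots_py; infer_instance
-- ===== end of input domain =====

-- B differs from A by sorting ONE flat token list globally (descending) and then grouping,
-- instead of grouping first and sorting each tenant's list; same results (objective: alternative).

-- shared helpers (the same expressions occur verbatim in both Pythons):
-- token = line.strip().split()[0] if line.strip() else ""   (the [0] is guarded by the non-empty strip, so headD is exact here)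
def pvToken (line : String) : String :=
  if PySem.Str.strip line = "" then "" else (PySem.Str.split₀ (PySem.Str.strip line)).headD ""

-- token.split("_", maxsplit=1)[1]   (called only under '"_" in token', where the [1] exists, so getD is exact here)
def pvTenant (t : String) : String :=
  ((PySem.Str.splitMax? t "_" 1).getD []).getD 1 ""

-- ===== PORT A =====
def parse_dslr_snapshots_py (stdout : String) : List (String × List String) :=
  -- by_tenant.setdefault(tenant, []).append(token)  ==  modify tenant [] (· ++ [token])
  let by_tenant : PySem.Dict String (List String) :=
    (PySem.Str.splitlines stdout).foldl (fun d line =>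
      let token := pvToken line
      if token = "" then d
      else if PySem.Str.isIn "_" token then d.modify (pvTenant token) [] (· ++ [token])
      else d) PySem.Dict.empty
  -- for names in by_tenant.values(): names.sort(reverse=True); return by_tenant (as items)
  by_tenant.items.map (fun p => (p.1, PySem.List.sorted p.2 (fun x => x) true))

-- ===== PORT B =====
def parse_dslr_snapshots_py_alt (stdout : String) : List (String × List String) :=
  let tokens : List String :=
    (PySem.Str.splitlines stdout).foldl (fun acc line =>
      let token := pvToken line
      if token ≠ "" ∧ PySem.Str.isIn "_" token then acc ++ [token] else acc) []
  let d0 : PySem.Dict String (List String) :=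
    tokens.foldl (fun d t => d.setdefault (pvTenant t) []) PySem.Dict.empty
  let d :=
    (PySem.List.sorted tokens (fun x => x) true).foldl
      (fun d t => d.modify (pvTenant t) [] (· ++ [t])) d0
  d.items

-- ===== PRECONDITION & SPEC =====
def Spec_parse_dslr_snapshots_py (stdout : String) (out : List (String × List String)) : Prop := out = parse_dslr_snapshots_py_alt stdout
instance (stdout : String) (out : List (String × List String)) : Decidable (Spec_parse_dslr_snapshots_py stdout out) := by unfold Spec_parse_dslr_snapshots_py; infer_instance

-- ===== CLAIM (what is proved, stated in full; the proofs are below) =====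
def Claim_equal_parse_dslr_snapshots_py : Prop := ∀ (stdout : String), Dom_parse_dslr_snapshots_py stdout → Spec_parse_dslr_snapshots_py stdout (parse_dslr_snapshots_py stdout)

-- ===== LEMMAS AND PROOFS =====

-- the shared filter test and the grouping step
def pvKeep (line : String) : Bool := pvToken line ≠ "" && PySem.Str.isIn "_" (pvToken line)

def pvGrp (d : PySem.Dict String (List String)) (t : String) : PySem.Dict String (List String) :=
  d.modify (pvTenant t) [] (· ++ [t])

-- A's loop body is a single conditional grouping step
theorem pvA_body (d : PySem.Dict String (List String)) (line : String) :
    (if pvToken line = "" then d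
     else if PySem.Str.isIn "_" (pvToken line) then d.modify (pvTenant (pvToken line)) [] (· ++ [pvToken line])
     else d) = if pvKeep line then pvGrp d (pvToken line) else d := by
  simp only [pvKeep, pvGrp]
  by_cases h1 : pvToken line = ""
  · simp [h1]
  · simp [h1]

-- A's dict loop over the lines = the grouping fold over the extracted token list
theorem pvToks (lines : List String) (d : PySem.Dict String (List String)) :
    lines.foldl (fun d line =>
      if pvToken line = "" then d
      else if PySem.Str.isIn "_" (pvToken line) then d.modify (pvTenant (pvToken line)) [] (· ++ [pvToken line])
      else d) d = ((lines.filter pvKeep).map pvToken).foldl pvGrp d := by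
  rw [PySem.List.foldl_congr_mem lines _
        (fun d line => if pvKeep line then pvGrp d (pvToken line) else d) d
        (fun acc x _ => pvA_body acc x),
      PySem.List.foldl_if_eq_foldl_filter, List.foldl_map]

-- B's token-collecting loop = the same extracted token list
theorem pvToksB (lines : List String) (acc : List String) :
    lines.foldl (fun acc line =>
      if pvToken line ≠ "" ∧ PySem.Str.isIn "_" (pvToken line) then acc ++ [pvToken line] else acc) acc
    = acc ++ (lines.filter pvKeep).map pvToken := by
  have hbody : ∀ (a : List String), ∀ x ∈ lines,
      (if pvToken x ≠ "" ∧ PySem.Str.isIn "_" (pvToken x) then a ++ [pvToken x] else a)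
        = if pvKeep x then a ++ [pvToken x] else a := by
    intro a x _
    by_cases h1 : pvToken x = ""
    · simp [pvKeep, h1]
    · simp [pvKeep, h1]
  rw [PySem.List.foldl_congr_mem lines _ _ acc hbody, PySem.List.foldl_append_if]

-- grouping fold = fold over (tenant, token) pairs, so the PySem grouping lemmas apply
theorem pvGrp_eq_pairs (ts : List String) (d : PySem.Dict String (List String)) :
    ts.foldl pvGrp d
      = (ts.map (fun t => (pvTenant t, t))).foldl (fun d p => d.modify p.1 [] (· ++ [p.2])) d := by
  rw [List.foldl_map]; rfl

theorem pvGrp_getD (ts : List String) (d : PySem.Dict String (List String)) (k : String) :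
    (ts.foldl pvGrp d).getD k [] = d.getD k [] ++ ts.filter (fun t => pvTenant t == k) := by
  rw [pvGrp_eq_pairs, PySem.Dict.getD_foldl_modify_append, List.filter_map]
  simp [Function.comp_def]

theorem pvGrp_keys (ts : List String) (d : PySem.Dict String (List String)) :
    (ts.foldl pvGrp d).keys = PySem.Set.update d.keys (ts.map pvTenant) := by
  exact PySem.Dict.keys_foldl_modify_key ts pvTenant [] (fun _ t old => old ++ [t]) d

-- the setdefault seeding pass: keys get updated, every value stays []
theorem pvSeed_keys (ts : List String) (d : PySem.Dict String (List String)) :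
    (ts.foldl (fun d t => d.setdefault (pvTenant t) []) d).keys
      = PySem.Set.update d.keys (ts.map pvTenant) := by
  induction ts generalizing d with
  | nil => rfl
  | cons t ts ih =>
      rw [List.foldl_cons, ih, List.map_cons]
      have : (d.setdefault (pvTenant t) []).keys = PySem.Set.add d.keys (pvTenant t) := by
        rw [PySem.Dict.keys_setdefault]
        by_cases h : d.contains (pvTenant t) = true
        · rw [if_pos h, PySem.Set.add_of_mem ((PySem.Dict.contains_iff_mem_keys d _).mp h)]
        · rw [if_neg h, PySem.Set.add_of_not_mem
            (fun hm => h ((PySem.Dict.contains_iff_mem_keys d _).mpr hm))]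
      rw [this]; rfl

theorem pvSeed_getD (ts : List String) (d : PySem.Dict String (List String)) (k : String) :
    (ts.foldl (fun d t => d.setdefault (pvTenant t) []) d).getD k [] = d.getD k [] := by
  induction ts generalizing d with
  | nil => rfl
  | cons t ts ih =>
      rw [List.foldl_cons, ih]
      by_cases h : k = pvTenant t
      · subst h; exact PySem.Dict.getD_setdefault_self ..
      · simp only [PySem.Dict.getD, PySem.Dict.get?_setdefault_of_ne d [] h]

theorem pvSet_update_of_subset (s : List String) (xs : List String) (h : ∀ x ∈ xs, x ∈ s) :
    PySem.Set.update s xs = s := by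
  induction xs generalizing s with
  | nil => rfl
  | cons x xs ih =>
      simp only [PySem.Set.update, List.foldl_cons]
      rw [PySem.Set.add_of_mem (h x (by simp))]
      exact ih s (fun y hy => h y (by simp [hy]))

-- global-descending-then-filter = filter-then-sort-descending (strings: a nonincreasing permutation is unique)
theorem pvSort_filter (ts : List String) (q : String → Bool) :
    (PySem.List.sorted ts (fun x => x) true).filter q
      = PySem.List.sorted (ts.filter q) (fun x => x) true := by
  refine List.Perm.eq_of_pairwise (le := fun a b : String => b ≤ a)
    (fun a b _ _ h1 h2 => le_antisymm h2 h1)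
    (List.Pairwise.filter q (PySem.List.sorted_pairwise_rev ts (fun x => x)))
    (PySem.List.sorted_pairwise_rev (ts.filter q) (fun x => x))
    (((PySem.List.sorted_perm ts (fun x => x) true).filter q).trans
      ((PySem.List.sorted_perm (ts.filter q) (fun x => x) true)).symm)

-- ===== VERDICT (by name: the statement is the Claim_ definition above) =====
theorem parse_dslr_snapshots_py_spec : Claim_equal_parse_dslr_snapshots_py := by
  intro stdout _
  unfold Spec_parse_dslr_snapshots_py
  simp only [parse_dslr_snapshots_py, parse_dslr_snapshots_py_alt]
  have hg : (fun (d : PySem.Dict String (List String)) (t : String) =>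
      d.modify (pvTenant t) [] (· ++ [t])) = pvGrp := rfl
  rw [hg, pvToks, pvToksB, List.nil_append]
  set ts : List String := ((PySem.Str.splitlines stdout).filter pvKeep).map pvToken with hts
  set dA := ts.foldl pvGrp PySem.Dict.empty with hdA
  set d0 := ts.foldl (fun d t => d.setdefault (pvTenant t) []) PySem.Dict.empty with hd0
  set dB := (PySem.List.sorted ts (fun x => x) true).foldl pvGrp d0 with hdB
  have hempty : (PySem.Dict.empty : PySem.Dict String (List String)).keys = ([] : List String) := rfl
  have hKA : dA.keys = PySem.Set.ofList (ts.map pvTenant) := by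
    rw [hdA, pvGrp_keys, hempty]; rfl
  have hK0 : d0.keys = PySem.Set.ofList (ts.map pvTenant) := by
    rw [hd0, pvSeed_keys, hempty]; rfl
  have hKB : dB.keys = PySem.Set.ofList (ts.map pvTenant) := by
    rw [hdB, pvGrp_keys, hK0]
    refine pvSet_update_of_subset _ _ (fun x hx => ?_)
    rw [PySem.Set.mem_ofList]
    rcases List.mem_map.mp hx with ⟨t, ht, rfl⟩
    exact List.mem_map_of_mem (by rw [PySem.List.mem_sorted] at ht; exact ht)
  have hnd : dA.keys.Nodup := by rw [hKA]; exact PySem.Set.nodup_ofList _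
  have hndB : dB.keys.Nodup := by rw [hKB]; exact PySem.Set.nodup_ofList _
  have hVA : ∀ k, dA.getD k [] = ts.filter (fun t => pvTenant t == k) := by
    intro k; rw [hdA, pvGrp_getD]; rfl
  have hVB : ∀ k, dB.getD k []
      = PySem.List.sorted (ts.filter (fun t => pvTenant t == k)) (fun x => x) true := by
    intro k
    rw [hdB, pvGrp_getD, hd0, pvSeed_getD, ← pvSort_filter]
    rfl
  rw [PySem.Dict.items_eq_map_keys dA hnd [], PySem.Dict.items_eq_map_keys dB hndB [],
      List.map_map, hKA, hKB]
  refine List.map_congr_left (fun k _ => ?_)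
  simp only [Function.comp_apply, hVA, hVB]
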